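-- pv_equiv track=rewrite | github.com/miliar/Code_Jam_Webscraper | solutions_python/Problem_201/672.py | bathroom_stalls
-- ===== SOURCE A (Python) =====
-- def get_stall(n):
--     if n % 2 == 0:
--         return n // 2, (n // 2) - 1
--     else:
--         return n // 2, n // 2
--
-- def bathroom_stalls(N, K):
--     level, count = 1, 1
--     n1, n2, k1, k2 = N - 1, N, 0, 1
--     while K > count:
--         level *= 2
--         count += level
--         if n2 % 2 == 0:
--             n2, n1 = (n2 // 2), (n2 // 2 - 1)
--             k2, k1 = k2, k2 + k1 * 2
--         else:
--             n2, n1 = (n2 // 2), (n2 // 2 - 1)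
--             k2, k1 = k2 * 2 + k1, k1
--     n = n2 if K - count + level <= k2 else n1
--     a, b = get_stall(n)
--     return "{} {}".format(max(a, b), min(a, b))
-- ===== SOURCE B (Python) =====
-- def bathroom_stalls(N, K):
--     # closed form: after d = bit_length(max(K,1)) - 1 full rounds, segment sizes are
--     # N//2**d and N//2**d - 1, with N % 2**d + 1 segments of the larger size.
--     d = max(K, 1).bit_length() - 1
--     p = 2 ** d
--     n = N // p if K - p + 1 <= N % p + 1 else N // p - 1
--     return "{} {}".format(n // 2, (n - 1) // 2)
-- ===== Notes on version B (the rewrite author's own statement) =====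
-- stated objective: simpler
-- what changed: B replaces A's six-variable level-by-level simulation loop with a closed form: the round index d comes from the bit length of K, and the segment size and its multiplicity at that round are N // 2**d and N % 2**d + 1.
import Mathlib
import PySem

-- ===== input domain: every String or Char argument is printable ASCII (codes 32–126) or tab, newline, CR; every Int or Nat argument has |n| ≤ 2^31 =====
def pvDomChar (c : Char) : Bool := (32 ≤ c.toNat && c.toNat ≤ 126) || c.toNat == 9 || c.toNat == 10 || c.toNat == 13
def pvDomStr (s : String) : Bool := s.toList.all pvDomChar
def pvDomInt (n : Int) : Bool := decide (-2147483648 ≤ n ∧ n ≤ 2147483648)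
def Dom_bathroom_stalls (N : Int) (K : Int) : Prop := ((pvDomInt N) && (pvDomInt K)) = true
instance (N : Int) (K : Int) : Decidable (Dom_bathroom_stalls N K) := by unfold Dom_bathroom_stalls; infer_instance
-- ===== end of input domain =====

-- B replaces A's level-by-level simulation loop with a closed form (simpler, O(1) arithmetic).

-- ===== PORT A =====
-- helper get_stall(n)
def getStall (n : Int) : Int × Int :=
  if PySem.Int.mod n 2 = 0 then
    (PySem.Int.floordiv n 2, PySem.Int.floordiv n 2 - 1)
  else
    (PySem.Int.floordiv n 2, PySem.Int.floordiv n 2)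

-- the 'while K > count' loop of A, with its six state variables; 0 < level justifies termination
def pyALoop (K level count n1 n2 k1 k2 : Int) (hl : 0 < level) :
    Int × Int × Int × Int × Int × Int :=
  if h : count < K then
    let level' := level * 2
    let count' := count + level'
    if PySem.Int.mod n2 2 = 0 then
      pyALoop K level' count' (PySem.Int.floordiv n2 2 - 1) (PySem.Int.floordiv n2 2)
        (k2 + k1 * 2) k2 (by omega)
    else
      pyALoop K level' count' (PySem.Int.floordiv n2 2 - 1) (PySem.Int.floordiv n2 2)
        k1 (k2 * 2 + k1) (by omega)
  else
    (level, count, n1, n2, k1, k2)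
termination_by (K - count).toNat
decreasing_by all_goals omega

def bathroom_stalls (N : Int) (K : Int) : String :=
  let s := pyALoop K 1 1 (N - 1) N 0 1 one_pos   -- (level, count, n1, n2, k1, k2)
  let level := s.1
  let count := s.2.1
  let n1 := s.2.2.1
  let n2 := s.2.2.2.1
  let k2 := s.2.2.2.2.2
  let n := if K - count + level ≤ k2 then n2 else n1
  let ab := getStall n
  PySem.Int.toStr (max ab.1 ab.2) ++ " " ++ PySem.Int.toStr (min ab.1 ab.2)

-- ===== PORT B =====
def bathroom_stalls_alt (N : Int) (K : Int) : String :=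
  let d : Nat := PySem.Int.bitLength (max K 1) - 1
  let p : Int := 2 ^ d
  let n : Int :=
    if K - p + 1 ≤ PySem.Int.mod N p + 1 then PySem.Int.floordiv N p
    else PySem.Int.floordiv N p - 1
  PySem.Int.toStr (PySem.Int.floordiv n 2) ++ " " ++ PySem.Int.toStr (PySem.Int.floordiv (n - 1) 2)

-- ===== PRECONDITION & SPEC =====
def Spec_bathroom_stalls (N : Int) (K : Int) (out : String) : Prop := out = bathroom_stalls_alt N K
instance (N : Int) (K : Int) (out : String) : Decidable (Spec_bathroom_stalls N K out) := by unfold Spec_bathroom_stalls; infer_instance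

-- ===== CLAIM (what is proved, stated in full; the proofs are below) =====
def Claim_equal_bathroom_stalls : Prop := ∀ (N : Int) (K : Int), Dom_bathroom_stalls N K → Spec_bathroom_stalls N K (bathroom_stalls N K)

-- ===== LEMMAS AND PROOFS =====

lemma pv_mod_bounds (a b : Int) (hb : 0 < b) :
    0 ≤ PySem.Int.mod a b ∧ PySem.Int.mod a b < b := by
  rw [PySem.Int.mod_eq_emod_of_pos hb]
  exact ⟨Int.emod_nonneg _ (by omega), Int.emod_lt_of_pos _ hb⟩

-- rewriting all six arguments of the loop at once (the proof argument is irrelevant)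
lemma pyALoop_congr {K l c n1 n2 k1 k2 l' c' n1' n2' k1' k2' : Int}
    (hl0 : 0 < l) (hl0' : 0 < l')
    (h1 : l = l') (h2 : c = c') (h3 : n1 = n1') (h4 : n2 = n2')
    (h5 : k1 = k1') (h6 : k2 = k2') :
    pyALoop K l c n1 n2 k1 k2 hl0 = pyALoop K l' c' n1' n2' k1' k2' hl0' := by
  subst h1 h2 h3 h4 h5 h6; rfl

-- halving step: floordiv/mod by 2^d compose to floordiv/mod by 2^(d+1)
lemma pv_step_div_mod (N : Int) (d : Nat) :
    PySem.Int.floordiv (PySem.Int.floordiv N (2 ^ d)) 2 = PySem.Int.floordiv N (2 ^ (d + 1)) ∧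
    PySem.Int.mod N (2 ^ (d + 1)) =
      PySem.Int.mod (PySem.Int.floordiv N (2 ^ d)) 2 * 2 ^ d + PySem.Int.mod N (2 ^ d) := by
  have hp : (0:Int) < 2 ^ d := by positivity
  have hpp : (0:Int) < 2 ^ (d + 1) := by positivity
  have hps : (2:Int) ^ (d + 1) = 2 ^ d * 2 := pow_succ 2 d
  have h1 := PySem.Int.floordiv_mul_add_mod N (2 ^ d)
  have hr := pv_mod_bounds N (2 ^ d) hp
  have h2 := PySem.Int.floordiv_mul_add_mod (PySem.Int.floordiv N (2 ^ d)) 2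
  have hb := pv_mod_bounds (PySem.Int.floordiv N (2 ^ d)) 2 (by norm_num)
  set q := PySem.Int.floordiv N (2 ^ d) with hqd
  set r := PySem.Int.mod N (2 ^ d) with hrd
  set q2 := PySem.Int.floordiv q 2 with hq2d
  set b := PySem.Int.mod q 2 with hbd
  have hdiv : PySem.Int.floordiv N (2 ^ (d + 1)) = q2 := by
    rw [PySem.Int.floordiv_eq_iff_of_pos hpp, hps]
    constructor
    · nlinarith [hr.1, hb.1, mul_nonneg hb.1 hp.le]
    · nlinarith [hr.2, hb.2, mul_nonneg (by omega : (0:Int) ≤ 1 - b) hp.le]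
  have hmod := PySem.Int.floordiv_mul_add_mod N (2 ^ (d + 1))
  rw [hdiv] at hmod
  refine ⟨hdiv.symm, ?_⟩
  linear_combination hmod - h1 - 2 ^ d * h2 - q2 * hps

-- the loop, started at the depth-d state, finishes at the depth-D state
lemma pv_loop_char (N K : Int) (D : Nat)
    (hKle : K ≤ 2 ^ (D + 1) - 1) (hlow : D = 0 ∨ (2 : Int) ^ D ≤ K) :
    ∀ k d (hl : (0:Int) < 2 ^ d), D - d = k → d ≤ D →
      pyALoop K (2 ^ d) (2 ^ (d + 1) - 1)
        (PySem.Int.floordiv N (2 ^ d) - 1) (PySem.Int.floordiv N (2 ^ d))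
        (2 ^ d - (PySem.Int.mod N (2 ^ d) + 1)) (PySem.Int.mod N (2 ^ d) + 1) hl =
      (2 ^ D, 2 ^ (D + 1) - 1,
        PySem.Int.floordiv N (2 ^ D) - 1, PySem.Int.floordiv N (2 ^ D),
        2 ^ D - (PySem.Int.mod N (2 ^ D) + 1), PySem.Int.mod N (2 ^ D) + 1) := by
  intro k
  induction k with
  | zero =>
    intro d hl hk hdD
    have hdd : d = D := by omega
    subst hdd
    rw [pyALoop, dif_neg (not_lt.mpr (by linarith))]
  | succ k IH =>
    intro d hl hk hdD
    have hdD' : d < D := by omega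
    have hDne : D ≠ 0 := by omega
    have hge : (2:Int) ^ (d + 1) ≤ 2 ^ D := pow_le_pow_right₀ (by norm_num) (by omega)
    have hKgt : (2:Int) ^ (d + 1) - 1 < K := by
      rcases hlow with h | h
      · exact absurd h hDne
      · linarith
    have st := pv_step_div_mod N d
    have hmb := pv_mod_bounds (PySem.Int.floordiv N (2 ^ d)) 2 (by norm_num)
    have hl' : (0:Int) < 2 ^ (d + 1) := by positivity
    have hps : (2:Int) ^ (d + 1) = 2 ^ d * 2 := pow_succ 2 d
    have hps2 : (2:Int) ^ (d + 2) = 2 ^ (d + 1) * 2 := pow_succ 2 (d + 1)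
    rw [pyALoop, dif_pos hKgt]
    by_cases hm : PySem.Int.mod (PySem.Int.floordiv N (2 ^ d)) 2 = 0
    · rw [if_pos hm]
      refine Eq.trans (pyALoop_congr _ hl' (by linarith) (by linarith) (by rw [st.1]) (by rw [st.1]) ?_ ?_) (IH (d + 1) hl' (by omega) (by omega))
      · rw [st.2, hm]; ring_nf
      · rw [st.2, hm]; ring
    · have hm1 : PySem.Int.mod (PySem.Int.floordiv N (2 ^ d)) 2 = 1 := by omega
      rw [if_neg hm]
      refine Eq.trans (pyALoop_congr _ hl' (by linarith) (by linarith) (by rw [st.1]) (by rw [st.1]) ?_ ?_) (IH (d + 1) hl' (by omega) (by omega))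
      · rw [st.2, hm1]; ring_nf
      · rw [st.2, hm1]; ring

-- max/min of get_stall n are n//2 and (n-1)//2
lemma pv_getstall (n : Int) :
    max (getStall n).1 (getStall n).2 = PySem.Int.floordiv n 2 ∧
    min (getStall n).1 (getStall n).2 = PySem.Int.floordiv (n - 1) 2 := by
  have h2 := PySem.Int.floordiv_mul_add_mod n 2
  have hb := pv_mod_bounds n 2 (by norm_num)
  unfold getStall
  by_cases hm : PySem.Int.mod n 2 = 0
  · rw [if_pos hm]
    have hfd : PySem.Int.floordiv (n - 1) 2 = PySem.Int.floordiv n 2 - 1 := by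
      rw [PySem.Int.floordiv_eq_iff_of_pos (by norm_num)]; omega
    constructor
    · exact max_eq_left (by omega)
    · rw [hfd]; exact min_eq_right (by omega)
  · have hm1 : PySem.Int.mod n 2 = 1 := by omega
    rw [if_neg hm]
    have hfd : PySem.Int.floordiv (n - 1) 2 = PySem.Int.floordiv n 2 := by
      rw [PySem.Int.floordiv_eq_iff_of_pos (by norm_num)]; omega
    constructor
    · show max (PySem.Int.floordiv n 2) (PySem.Int.floordiv n 2) = PySem.Int.floordiv n 2
      rw [max_self]
    · show min (PySem.Int.floordiv n 2) (PySem.Int.floordiv n 2) = PySem.Int.floordiv (n - 1) 2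
      rw [min_self, hfd]

-- ===== VERDICT (by name: the statement is the Claim_ definition above) =====
theorem bathroom_stalls_spec : Claim_equal_bathroom_stalls := by
  intro N K _
  show bathroom_stalls N K = bathroom_stalls_alt N K
  set D : Nat := PySem.Int.bitLength (max K 1) - 1 with hD
  have hM1 : (1:Int) ≤ max K 1 := le_max_right _ _
  have hbl := PySem.Int.lt_two_pow_bitLength (max K 1)
  have hbl1 : 1 ≤ PySem.Int.bitLength (max K 1) := by
    by_contra h
    have h0 : PySem.Int.bitLength (max K 1) = 0 := by omega
    rw [h0] at hbl; omega
  have hDD : PySem.Int.bitLength (max K 1) = D + 1 := by omega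
  have habs : ((max K 1).natAbs : Int) = max K 1 := Int.natAbs_of_nonneg (by omega)
  have hup : max K 1 ≤ 2 ^ (D + 1) - 1 := by
    rw [hDD] at hbl
    have h1 : ((max K 1).natAbs : Int) < ((2 ^ (D + 1) : Nat) : Int) := by exact_mod_cast hbl
    rw [habs] at h1
    push_cast at h1
    omega
  have hK1 : K ≤ 2 ^ (D + 1) - 1 := le_trans (le_max_left K 1) hup
  have hlow : D = 0 ∨ (2:Int) ^ D ≤ K := by
    by_cases hk : K ≤ 1
    · left
      have h1 : max K 1 = 1 := max_eq_right hk
      have h2 : PySem.Int.bitLength (max K 1) = 1 := by rw [h1]; decide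
      omega
    · right
      have hKm : max K 1 = K := max_eq_left (by omega)
      have hlo := PySem.Int.two_pow_bitLength_le (max K 1) (by omega)
      rw [hDD, Nat.add_sub_cancel] at hlo
      calc (2:Int) ^ D = ((2 ^ D : Nat) : Int) := by push_cast; ring
        _ ≤ ((max K 1).natAbs : Int) := by exact_mod_cast hlo
        _ = K := by rw [habs, hKm]
  have hloop := pv_loop_char N K D hK1 hlow D 0 (by norm_num) (by omega) (by omega)
  have hd1 : PySem.Int.floordiv N 1 = N := by
    rw [PySem.Int.floordiv_eq_ediv_of_pos one_pos]; exact Int.ediv_one N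
  have hm1 : PySem.Int.mod N 1 = 0 := by
    rw [PySem.Int.mod_eq_emod_of_pos one_pos]; exact Int.emod_one N
  have hbridge : pyALoop K 1 1 (N - 1) N 0 1 one_pos =
      pyALoop K (2 ^ (0:Nat)) (2 ^ (0 + 1) - 1)
        (PySem.Int.floordiv N (2 ^ (0:Nat)) - 1) (PySem.Int.floordiv N (2 ^ (0:Nat)))
        (2 ^ (0:Nat) - (PySem.Int.mod N (2 ^ (0:Nat)) + 1)) (PySem.Int.mod N (2 ^ (0:Nat)) + 1)
        (by norm_num) :=
    pyALoop_congr one_pos (by norm_num) (by norm_num) (by norm_num)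
      (by rw [pow_zero, hd1]) (by rw [pow_zero, hd1])
      (by rw [pow_zero, hm1]; norm_num) (by rw [pow_zero, hm1]; norm_num)
  unfold bathroom_stalls bathroom_stalls_alt
  rw [hbridge, hloop, ← hD]
  dsimp only
  have hc : (K - (2 ^ (D + 1) - 1) + 2 ^ D ≤ PySem.Int.mod N (2 ^ D) + 1) =
      (K - 2 ^ D + 1 ≤ PySem.Int.mod N (2 ^ D) + 1) := by
    apply propext
    rw [pow_succ]
    constructor <;> intro h <;> linarith
  simp only [hc]
  rw [(pv_getstall _).1, (pv_getstall _).2]
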